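-- pv_equiv track=rewrite | github.com/yhs3434/Algorithms | programmers/2018 KAKAO BLIND RECRUITMENT/secretMap.py | solution
-- ===== SOURCE A (Python) =====
-- def solution(n, arr1, arr2):
--     answer = []
--
--     for i in range(n):
--         n1 = arr1[i]
--         n2 = arr2[i]
--         resultMap = ""
--         for j in range(n):
--             r1 = n1%2
--             r2 = n2%2
--             n1 //= 2
--             n2 //= 2
--             if(r1 == 0 and r2 == 0):
--                 resultMap = ' '+resultMap
--             else:
--                 resultMap = '#' + resultMap
--         answer.append(resultMap)
--
--     return answer
-- ===== SOURCE B (Python) =====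
-- def solution(n, arr1, arr2):
--     if n <= 0:
--         return []
--     mod = 2 ** n
--     tr = str.maketrans('10', '# ')
--     return [format((a | b) % mod, '0{}b'.format(n)).translate(tr)
--             for a, b in zip(arr1[:n], arr2[:n])]
-- ===== Notes on version B (the rewrite author's own statement) =====
-- stated objective: faster
-- what changed: A peels bits with a nested Python j-loop mutating n1/n2 and prepending one character at a time; B computes each row in one step as format((arr1[i] | arr2[i]) % 2**n, '0{n}b') translated '1'/'0' to '#'/' ' via str.translate, over zip of the two sliced lists.
import Mathlib
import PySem

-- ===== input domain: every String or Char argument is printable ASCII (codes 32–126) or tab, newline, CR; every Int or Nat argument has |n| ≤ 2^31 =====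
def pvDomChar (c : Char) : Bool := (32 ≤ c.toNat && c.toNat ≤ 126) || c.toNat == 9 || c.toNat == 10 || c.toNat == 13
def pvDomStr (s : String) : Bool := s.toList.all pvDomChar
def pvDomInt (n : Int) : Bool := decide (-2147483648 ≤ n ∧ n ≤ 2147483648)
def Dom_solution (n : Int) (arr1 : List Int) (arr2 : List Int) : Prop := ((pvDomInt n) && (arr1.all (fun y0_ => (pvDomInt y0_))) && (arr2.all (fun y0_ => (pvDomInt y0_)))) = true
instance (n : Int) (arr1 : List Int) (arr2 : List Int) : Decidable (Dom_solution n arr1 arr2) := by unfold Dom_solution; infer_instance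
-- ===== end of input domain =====

-- B replaces A's nested bit-peeling loops by a per-row formatted binary of the bitwise OR,
-- translated '1'/'0' → '#'/' ' (idiomatic; same asymptotic cost).

-- ===== PORT A =====
-- the body of A's inner 'for j in range(n)' loop (state: n1, n2, resultMap)
def pvStep (st : Int × Int × List Char) (_ : Int) : Int × Int × List Char :=
  let r1 := PySem.Int.mod st.1 2
  let r2 := PySem.Int.mod st.2.1 2
  let n1 := PySem.Int.floordiv st.1 2
  let n2 := PySem.Int.floordiv st.2.1 2
  if r1 = 0 ∧ r2 = 0 then (n1, n2, ' ' :: st.2.2) else (n1, n2, '#' :: st.2.2)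

def solution (n : Int) (arr1 : List Int) (arr2 : List Int) : List String :=
  (PySem.List.pyRange 0 n 1).foldl (fun answer i =>
    let n1 := (PySem.List.pyGet? arr1 i).getD 0   -- arr1[i]; Pre_ keeps i in range so the default is never reached
    let n2 := (PySem.List.pyGet? arr2 i).getD 0
    answer ++ [String.ofList (((PySem.List.pyRange 0 n 1).foldl pvStep (n1, n2, ([] : List Char))).2.2)]) []

-- ===== PORT B =====
-- format(v, '0{w}b') built by hand: w binary digits of v, low bit last; exact for 0 ≤ v < 2^w,
-- which holds here because B always formats v = x % 2**n with w = n
def pvFmtBin : Nat → Int → List Char → List Char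
  | 0, _, acc => acc
  | w+1, v, acc => pvFmtBin w (PySem.Int.floordiv v 2) ((if PySem.Int.mod v 2 = 0 then '0' else '1') :: acc)

-- str.maketrans('10', '# ') applied by .translate: a char-to-char map
def pvTr (c : Char) : Char := if c = '1' then '#' else if c = '0' then ' ' else c

def solution_alt (n : Int) (arr1 : List Int) (arr2 : List Int) : List String :=
  if n ≤ 0 then []
  else
    let md : Int := 2 ^ n.toNat   -- 2 ** n  (0 < n in this branch)
    (List.zip (PySem.List.slice arr1 none (some n)) (PySem.List.slice arr2 none (some n))).map
      (fun p => String.ofList ((pvFmtBin n.toNat (PySem.Int.mod (PySem.Int.bor p.1 p.2) md) []).map pvTr))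

-- ===== PRECONDITION & SPEC =====
-- A raises IndexError when some i < n is out of range of arr1 or arr2; exactly those inputs are excluded.
def Pre_solution (n : Int) (arr1 : List Int) (arr2 : List Int) : Prop :=
  0 < n → (n ≤ (arr1.length : Int) ∧ n ≤ (arr2.length : Int))
instance (n : Int) (arr1 : List Int) (arr2 : List Int) : Decidable (Pre_solution n arr1 arr2) := by unfold Pre_solution; infer_instance

def pvWitness_solution : Int × List Int × List Int := (2, [1, 2], [3, 0])

def Spec_solution (n : Int) (arr1 : List Int) (arr2 : List Int) (out : List String) : Prop := out = solution_alt n arr1 arr2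
instance (n : Int) (arr1 : List Int) (arr2 : List Int) (out : List String) : Decidable (Spec_solution n arr1 arr2 out) := by unfold Spec_solution; infer_instance

-- ===== CLAIM (what is proved, stated in full; the proofs are below) =====
def Claim_equal_solution : Prop := ∀ (n : Int) (arr1 : List Int) (arr2 : List Int), Dom_solution n arr1 arr2 → Pre_solution n arr1 arr2 → Spec_solution n arr1 arr2 (solution n arr1 arr2)

-- ===== LEMMAS AND PROOFS =====

-- the common shape of the per-row result: k chars, '#' where the low bit of v is set, MSB first
def pvHash : Nat → Int → List Char → List Char
  | 0, _, acc => acc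
  | k+1, v, acc => pvHash k (PySem.Int.floordiv v 2) ((if PySem.Int.mod v 2 = 0 then ' ' else '#') :: acc)

theorem pvHash_succ (k : Nat) (v : Int) (acc : List Char) :
    pvHash (k+1) v acc = pvHash k (PySem.Int.floordiv v 2) ((if PySem.Int.mod v 2 = 0 then ' ' else '#') :: acc) := rfl

theorem nat_sub_and (n m : Nat) : n - (n &&& m) = Nat.ldiff n m := by
  induction n using Nat.binaryRec generalizing m with
  | zero => simp [Nat.ldiff]
  | bit b n ih =>
    rw [← Nat.bit_bodd_div2 m, Nat.ldiff_bit, Nat.land_bit]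
    have hle : n &&& m.div2 ≤ n := Nat.and_le_left
    have := ih m.div2
    cases b <;> cases m.bodd <;> simp [Nat.bit] <;> omega

theorem pybor_eq_lor (a b : Int) : PySem.Int.bor a b = Int.lor a b := by
  cases a with
  | ofNat m => cases b with
    | ofNat n =>
      show PySem.Int.bor _ _ = ((m ||| n : Nat) : Int)
      unfold PySem.Int.bor; simp
    | negSucc n =>
      show PySem.Int.bor _ _ = Int.negSucc (n.ldiff m)
      unfold PySem.Int.bor
      rw [if_pos (by exact Int.natCast_nonneg m), if_neg (Int.negSucc_lt_zero n).not_ge]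
      have h1 : (-(Int.negSucc n) - 1).toNat = n := by rw [Int.negSucc_eq]; omega
      have h2 : ((Int.ofNat m).toNat) = m := rfl
      rw [h1, h2, nat_sub_and, Int.negSucc_eq]; omega
  | negSucc m =>
    have h1 : (-(Int.negSucc m) - 1).toNat = m := by rw [Int.negSucc_eq]; omega
    cases b with
    | ofNat n =>
      show PySem.Int.bor _ _ = Int.negSucc (m.ldiff n)
      unfold PySem.Int.bor
      rw [if_neg (Int.negSucc_lt_zero m).not_ge, if_pos (by exact Int.natCast_nonneg n), h1]
      have h2 : ((Int.ofNat n).toNat) = n := rfl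
      rw [h2, nat_sub_and, Int.negSucc_eq]; omega
    | negSucc n =>
      show PySem.Int.bor _ _ = Int.negSucc (m &&& n)
      unfold PySem.Int.bor
      rw [if_neg (Int.negSucc_lt_zero m).not_ge, if_neg (Int.negSucc_lt_zero n).not_ge, h1]
      have h2 : (-(Int.negSucc n) - 1).toNat = n := by rw [Int.negSucc_eq]; omega
      rw [h2, Int.negSucc_eq]; omega

theorem pymod_bit (c : Bool) (x : Int) : PySem.Int.mod (Int.bit c x) 2 = cond c 1 0 := by
  rw [PySem.Int.mod_eq_emod_of_pos (by norm_num), Int.bit_val]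
  cases c <;> simp <;> omega

theorem pydiv_bit (c : Bool) (x : Int) : PySem.Int.floordiv (Int.bit c x) 2 = x := by
  rw [PySem.Int.floordiv_eq_ediv_of_pos (by norm_num), Int.bit_val]
  cases c <;> simp <;> omega

theorem pydiv_two_eq_div2 (a : Int) : PySem.Int.floordiv a 2 = a.div2 := by
  conv_lhs => rw [← Int.bit_decomp a, pydiv_bit]

theorem int_div2_bit (c : Bool) (x : Int) : (Int.bit c x).div2 = x := by
  rw [← pydiv_two_eq_div2, pydiv_bit]

theorem pybor_div2 (a b : Int) : PySem.Int.floordiv (PySem.Int.bor a b) 2 = PySem.Int.bor (PySem.Int.floordiv a 2) (PySem.Int.floordiv b 2) := by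
  rw [pydiv_two_eq_div2, pydiv_two_eq_div2, pydiv_two_eq_div2, pybor_eq_lor, pybor_eq_lor]
  conv_lhs => rw [← Int.bit_decomp a, ← Int.bit_decomp b, Int.lor_bit, int_div2_bit]

theorem pymod_two_bodd (a : Int) : PySem.Int.mod a 2 = cond a.bodd 1 0 := by
  conv_lhs => rw [← Int.bit_decomp a, pymod_bit]

theorem pybor_mod2 (a b : Int) : (PySem.Int.mod (PySem.Int.bor a b) 2 = 0) ↔ (PySem.Int.mod a 2 = 0 ∧ PySem.Int.mod b 2 = 0) := by
  rw [pymod_two_bodd, pymod_two_bodd, pymod_two_bodd, pybor_eq_lor]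
  conv_lhs => rw [← Int.bit_decomp a, ← Int.bit_decomp b, Int.lor_bit, Int.bodd_bit]
  cases a.bodd <;> cases b.bodd <;> simp

-- A's inner loop over any k-element list computes the k low bits of (a | b), MSB first
theorem foldl_pvStep (l : List Int) : ∀ (a b : Int) (acc : List Char),
    ((l.foldl pvStep (a, b, acc)).2.2) = pvHash l.length (PySem.Int.bor a b) acc := by
  induction l with
  | nil => intro a b acc; simp [pvHash]
  | cons x l ih =>
    intro a b acc
    rw [List.foldl_cons]
    show _ = pvHash (l.length + 1) (PySem.Int.bor a b) acc
    rw [pvHash_succ, pybor_div2]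
    by_cases h : PySem.Int.mod a 2 = 0 ∧ PySem.Int.mod b 2 = 0
    · rw [if_pos ((pybor_mod2 a b).mpr h)]
      rw [show pvStep (a, b, acc) x
            = (PySem.Int.floordiv a 2, PySem.Int.floordiv b 2, ' ' :: acc) by
          simp only [pvStep]; rw [if_pos h]]
      exact ih _ _ _
    · rw [if_neg (fun hc => h ((pybor_mod2 a b).mp hc))]
      rw [show pvStep (a, b, acc) x
            = (PySem.Int.floordiv a 2, PySem.Int.floordiv b 2, '#' :: acc) by
          simp only [pvStep]; rw [if_neg h]]
      exact ih _ _ _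

-- translating B's binary digits gives the common shape
theorem fmt_map (k : Nat) : ∀ (v : Int) (acc : List Char),
    (pvFmtBin k v acc).map pvTr = pvHash k v (acc.map pvTr) := by
  induction k with
  | zero => intro v acc; simp [pvFmtBin, pvHash]
  | succ k ih =>
    intro v acc
    unfold pvFmtBin pvHash
    rw [ih]
    by_cases h : PySem.Int.mod v 2 = 0
    · rw [if_pos h, if_pos h]; rfl
    · rw [if_neg h, if_neg h]; rfl

-- reducing v modulo 2^k does not change its k low bits
theorem pvHash_mod (k : Nat) : ∀ (v : Int) (acc : List Char),
    pvHash k (PySem.Int.mod v (2 ^ k)) acc = pvHash k v acc := by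
  induction k with
  | zero => intro v acc; simp [pvHash]
  | succ k ih =>
    intro v acc
    have hm : (0:Int) < 2 ^ k := by positivity
    have hm2 : (0:Int) < 2 ^ (k+1) := by positivity
    have hM1 : PySem.Int.mod (PySem.Int.mod v (2 ^ (k+1))) 2 = PySem.Int.mod v 2 := by
      rw [PySem.Int.mod_eq_emod_of_pos hm2, PySem.Int.mod_eq_emod_of_pos (by norm_num),
          PySem.Int.mod_eq_emod_of_pos (by norm_num)]
      exact Int.emod_emod_of_dvd v ⟨2 ^ k, by ring⟩
    have hM2 : PySem.Int.floordiv (PySem.Int.mod v (2 ^ (k+1))) 2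
        = PySem.Int.mod (PySem.Int.floordiv v 2) (2 ^ k) := by
      rw [PySem.Int.mod_eq_emod_of_pos hm2, PySem.Int.mod_eq_emod_of_pos hm,
          PySem.Int.floordiv_eq_ediv_of_pos (by norm_num), PySem.Int.floordiv_eq_ediv_of_pos (by norm_num)]
      rw [Int.emod_def, Int.emod_def]
      rw [show v - 2 ^ (k+1) * (v / 2 ^ (k+1)) = v + (-(2 ^ k * (v / 2 ^ (k+1)))) * 2 by ring]
      rw [Int.add_mul_ediv_right _ _ (by norm_num : (2:Int) ≠ 0)]
      have h21 : v / 2 ^ (k+1) = v / 2 / 2 ^ k := by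
        rw [Int.ediv_ediv_of_nonneg (by norm_num : (0:Int) ≤ 2), ← pow_succ']
      rw [h21]; ring
    unfold pvHash
    rw [hM1, hM2, ih]

theorem solution_eq (n : Int) (arr1 : List Int) (arr2 : List Int)
    (h : Pre_solution n arr1 arr2) : solution n arr1 arr2 = solution_alt n arr1 arr2 := by
  by_cases hn : n ≤ 0
  · simp [solution, solution_alt, hn, PySem.List.pyRange_one_eq_nil hn]
  · push_neg at hn
    obtain ⟨h1, h2⟩ := h hn
    have hk1 : n.toNat ≤ arr1.length := by omega
    have hk2 : n.toNat ≤ arr2.length := by omega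
    rw [solution, solution_alt, if_neg (by omega)]
    rw [PySem.List.foldl_append_singleton_eq_map]
    simp only [PySem.List.slice_to arr1 (le_of_lt hn), PySem.List.slice_to arr2 (le_of_lt hn),
      List.nil_append]
    rw [PySem.List.pyRange_one 0 n]
    simp only [zero_add, sub_zero]
    apply List.ext_getElem
    · simp only [List.length_map, List.length_range, List.length_zip, List.length_take]
      omega
    · intro i hi hi'
      have hik : i < n.toNat := by simpa using hi
      have hi1 : i < arr1.length := by omega
      have hi2 : i < arr2.length := by omega
      simp only [List.getElem_map, List.getElem_range, List.getElem_zip, List.getElem_take,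
        zero_add]
      rw [PySem.List.pyGet?_natCast, PySem.List.pyGet?_natCast,
        List.getElem?_eq_getElem hi1, List.getElem?_eq_getElem hi2]
      simp only [Option.getD_some]
      rw [foldl_pvStep]
      simp only [List.length_map, List.length_range, sub_zero]
      rw [fmt_map, List.map_nil, pvHash_mod]

-- ===== VERDICT (by name: the statement is the Claim_ definition above) =====
theorem solution_spec : Claim_equal_solution := by
  intro n arr1 arr2 _ hpre
  unfold Spec_solution
  exact solution_eq n arr1 arr2 hpre
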